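-- pv_equiv track=rewrite | github.com/UU-tracktech/tracktech | docs/documentation.py | get_module_import_parts
-- ===== SOURCE A (Python) =====
-- def get_module_import_parts(module_import):
--     """Get all module imports from an initial module import, this includes all higher level imports.
--
--     module_import = 'example.module.import.part' generates the following list:
--     [
--         'example.module.import.part',
--         'example.module.import',
--         'example.module',
--         'example'
--     ]
--
--     Args:
--         module_import (str): initial module import to derive higher level imports from.
--
--     Returns:
--         List[str]: list of module import parts.
--     """
--     module_imports = [module_import]
--
--     index = len(module_import) - 1
--     while index > 0:
--         if module_import[index] == '.':
--             module_imports.append(module_import[:index])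
--
--         index -= 1
--
--     return module_imports
-- ===== SOURCE B (Python) =====
-- def get_module_import_parts(module_import):
--     """Split the import on dots, rebuild the progressive prefixes left-to-right by
--     joining segments, and return the full import followed by the prefixes in
--     descending order (a leading dot would yield the empty prefix '', which is not
--     a module name, so it is dropped)."""
--     segments = module_import.split('.')
--     prefixes = [segments[0]]
--     for seg in segments[1:]:
--         prefixes.append(prefixes[-1] + '.' + seg)
--     return [module_import] + [p for p in reversed(prefixes[:-1]) if p]
-- ===== Notes on version B (the rewrite author's own statement) =====
-- stated objective: faster
-- what changed: B splits the string into dot-separated segments once and rebuilds the progressive prefixes left-to-right by joining segments with an accumulator (then reverses, dropping the empty leading-dot prefix), instead of A's right-to-left per-character index loop; the per-character work moves from Python bytecode into the C-level split.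
import Mathlib
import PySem

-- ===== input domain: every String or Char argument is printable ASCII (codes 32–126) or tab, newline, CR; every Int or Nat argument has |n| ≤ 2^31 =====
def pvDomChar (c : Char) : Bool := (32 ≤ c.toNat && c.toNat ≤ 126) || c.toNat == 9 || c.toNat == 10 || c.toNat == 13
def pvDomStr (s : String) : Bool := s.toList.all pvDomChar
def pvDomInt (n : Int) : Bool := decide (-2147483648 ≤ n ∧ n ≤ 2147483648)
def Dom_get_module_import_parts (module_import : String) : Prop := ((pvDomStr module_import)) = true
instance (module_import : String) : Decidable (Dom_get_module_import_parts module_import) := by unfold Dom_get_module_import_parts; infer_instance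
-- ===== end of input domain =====

-- B splits the string on '.' once and rebuilds the progressive prefixes left-to-right by
-- joining segments, then reverses them, instead of A's right-to-left per-character index
-- loop slicing the original string (measured faster: the scan moves into C-level split).

-- ===== PORT A =====
-- A: module_imports = [module_import]; index = len-1; while index > 0: if s[index]=='.': append s[:index]; index -= 1
def aGo (l : List Char) (acc : List (List Char)) (index : Int) : List (List Char) :=
  if 0 < index then
    aGo l
      (if PySem.List.pyGet? l index = some '.' then acc ++ [PySem.List.slice l none (some index)] else acc)
      (index - 1)
  else acc
termination_by index.toNat
decreasing_by omega

def get_module_import_parts (module_import : String) : List String :=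
  (aGo module_import.toList [module_import.toList] ((module_import.toList.length : Int) - 1)).map String.mk

-- ===== PORT B =====
-- loop body: prefixes.append(prefixes[-1] + '.' + seg)  (prefixes is never empty, so getLastD's default is never used)
def bStep (acc : List (List Char)) (seg : List Char) : List (List Char) :=
  acc ++ [acc.getLastD [] ++ '.' :: seg]

-- B: segments = s.split('.'); prefixes = [segments[0]]; for seg in segments[1:]: append last+'.'+seg;
--    return [s] + [p for p in reversed(prefixes[:-1]) if p]
def get_module_import_parts_alt (module_import : String) : List String :=
  let segments := PySem.Chars.splitOn module_import.toList ['.']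
  let prefixes := (segments.drop 1).foldl bStep [segments.headD []]
  module_import :: ((prefixes.dropLast.reverse.filter (fun p => !p.isEmpty)).map String.mk)

-- ===== PRECONDITION & SPEC =====
def Spec_get_module_import_parts (module_import : String) (out : List String) : Prop := out = get_module_import_parts_alt module_import
instance (module_import : String) (out : List String) : Decidable (Spec_get_module_import_parts module_import out) := by unfold Spec_get_module_import_parts; infer_instance

-- ===== CLAIM (what is proved, stated in full; the proofs are below) =====
def Claim_equal_get_module_import_parts : Prop := ∀ (module_import : String), Dom_get_module_import_parts module_import → Spec_get_module_import_parts module_import (get_module_import_parts module_import)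

-- ===== LEMMAS AND PROOFS =====

-- the common characterisation: prefixes cut at every dot position j with 0 < j < n, descending
def desc (l : List Char) : Nat → List (List Char)
  | 0 => []
  | j + 1 => (if 0 < j ∧ l[j]? = some '.' then [l.take j] else []) ++ desc l j

theorem desc_succ (l : List Char) (j : Nat) :
    desc l (j + 1) = (if 0 < j ∧ l[j]? = some '.' then [l.take j] else []) ++ desc l j := rfl

-- A's loop produces acc ++ desc
theorem aGo_eq_desc (l : List Char) (n : Nat) : ∀ acc, aGo l acc (n : Int) = acc ++ desc l (n + 1) := by
  induction n with
  | zero => intro acc; rw [aGo]; simp [desc]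
  | succ n ih =>
    intro acc
    rw [aGo, if_pos (show (0 : Int) < ((n + 1 : Nat) : Int) by exact_mod_cast Nat.succ_pos n)]
    have hget : PySem.List.pyGet? l ((n + 1 : Nat) : Int) = l[n + 1]? :=
      PySem.List.pyGet?_natCast l (n + 1)
    have hslice : PySem.List.slice l none (some ((n + 1 : Nat) : Int)) = l.take (n + 1) := by
      rw [PySem.List.slice_to l (by positivity), Int.toNat_natCast]
    have harg : ((n + 1 : Nat) : Int) - 1 = (n : Int) := by push_cast; ring
    rw [hget, hslice, harg]
    by_cases hd : l[n + 1]? = some '.'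
    · rw [if_pos hd, ih, desc_succ l (n + 1), if_pos ⟨Nat.succ_pos n, hd⟩]
      simp
    · rw [if_neg hd, ih, desc_succ l (n + 1), if_neg (fun hc => hd hc.2), List.nil_append]

-- structural recursion equivalent to Python's str.split('.')
def mySplit : List Char → List Char → List (List Char)
  | pre, [] => [pre]
  | pre, c :: r => if c = '.' then pre :: mySplit [] r else mySplit (pre ++ [c]) r

theorem splitOn_go_eq (l : List Char) : ∀ (fuel : Nat) (cur : List Char) (acc : List (List Char)),
    l.length < fuel →
    PySem.Chars.splitOn.go ['.'] fuel l cur acc = acc.reverse ++ mySplit cur.reverse l := by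
  induction l with
  | nil =>
    intro fuel cur acc h
    match fuel with
    | f + 1 => simp [PySem.Chars.splitOn.go, mySplit]
  | cons c r ih =>
    intro fuel cur acc h
    match fuel with
    | f + 1 =>
      simp only [PySem.Chars.splitOn.go]
      by_cases hc : c = '.'
      · rw [if_pos (by simp [List.isPrefixOf, hc])]
        simp only [List.length_singleton, List.drop_succ_cons, List.drop_zero]
        rw [ih f [] (cur.reverse :: acc) (by simp at h; omega)]
        simp [mySplit, hc]
      · rw [if_neg (by simp [List.isPrefixOf]; exact fun h' => hc h'.symm)]
        rw [ih f (c :: cur) acc (by simp at h; omega)]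
        simp [mySplit, hc]

theorem splitOn_eq_mySplit (l : List Char) :
    PySem.Chars.splitOn l ['.'] = mySplit [] l := by
  rw [PySem.Chars.splitOn, splitOn_go_eq l (l.length + 1) [] [] (Nat.lt_succ_self _)]
  simp

-- first segment and remaining segments of the split, as functions of the string alone
def firstSeg : List Char → List Char
  | [] => []
  | c :: r => if c = '.' then [] else c :: firstSeg r

def restSegs : List Char → List (List Char)
  | [] => []
  | c :: r => if c = '.' then firstSeg r :: restSegs r else restSegs r

theorem mySplit_eq (l : List Char) : ∀ pre, mySplit pre l = (pre ++ firstSeg l) :: restSegs l := by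
  induction l with
  | nil => intro pre; simp [mySplit, firstSeg, restSegs]
  | cons c r ih =>
    intro pre
    by_cases hc : c = '.'
    · simp [mySplit, firstSeg, restSegs, hc, ih]
    · simp [mySplit, firstSeg, restSegs, hc, ih]

-- the values appended by B's join loop, as a function of the running last prefix
def chain : List Char → List (List Char) → List (List Char)
  | _, [] => []
  | p, s :: ss => (p ++ '.' :: s) :: chain (p ++ '.' :: s) ss

theorem foldl_bStep (segs : List (List Char)) :
    ∀ (acc : List (List Char)), acc ≠ [] →
    List.foldl bStep acc segs = acc ++ chain (acc.getLastD []) segs := by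
  induction segs with
  | nil => intro acc _; simp [chain]
  | cons s ss ih =>
    intro acc hne
    rw [List.foldl_cons]
    have hb : bStep acc s = acc ++ [acc.getLastD [] ++ '.' :: s] := rfl
    rw [hb, ih _ (by simp)]
    have hlast : (acc ++ [acc.getLastD [] ++ '.' :: s]).getLastD [] = acc.getLastD [] ++ '.' :: s := by
      simp [List.getLastD_concat]
    rw [hlast]
    simp [chain]

-- the cut list: for every dot of l (ascending) the text before it, then the whole of l (all behind prefix p)
def cuts : List Char → List Char → List (List Char)
  | p, [] => [p]
  | p, c :: r => if c = '.' then p :: cuts (p ++ ['.']) r else cuts (p ++ [c]) r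

theorem chain_eq_cuts (l : List Char) : ∀ p,
    (p ++ firstSeg l) :: chain (p ++ firstSeg l) (restSegs l) = cuts p l := by
  induction l with
  | nil => intro p; simp [firstSeg, restSegs, chain, cuts]
  | cons c r ih =>
    intro p
    by_cases hc : c = '.'
    · subst hc
      have h := ih (p ++ ['.'])
      simp only [List.append_assoc, List.singleton_append] at h
      simp only [firstSeg, restSegs, cuts, if_true, List.append_nil, chain]
      rw [h]
    · simp only [firstSeg, restSegs, if_neg hc, cuts]
      have := ih (p ++ [c])
      simp only [List.append_assoc, List.singleton_append] at this
      simpa using this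

-- ascending dot positions
def dotIdx : List Char → List Nat
  | [] => []
  | c :: r => (if c = '.' then [0] else []) ++ (dotIdx r).map (· + 1)

theorem cuts_eq_dotIdx (l : List Char) : ∀ p,
    cuts p l = (dotIdx l).map (fun k => p ++ l.take k) ++ [p ++ l] := by
  induction l with
  | nil => intro p; simp [cuts, dotIdx]
  | cons c r ih =>
    intro p
    by_cases hc : c = '.'
    · subst hc
      simp only [cuts, if_pos rfl, dotIdx, ih (p ++ ['.'])]
      simp [List.map_map, Function.comp, List.take_succ_cons, List.append_assoc]
    · simp only [cuts, if_neg hc, dotIdx, ih (p ++ [c]), if_neg hc]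
      simp [List.map_map, Function.comp, List.take_succ_cons, List.append_assoc]

theorem dotIdx_eq_range (l : List Char) :
    dotIdx l = (List.range l.length).filter (fun j => decide (l[j]? = some '.')) := by
  induction l with
  | nil => simp [dotIdx]
  | cons c r ih =>
    simp only [dotIdx, List.length_cons, List.range_succ_eq_map, List.filter_cons,
      List.filter_map, ih]
    by_cases hc : c = '.'
    · simp [hc, Function.comp_def]
      rfl
    · simp [hc, Function.comp_def]
      rfl

theorem desc_eq_range (l : List Char) (n : Nat) :
    desc l n = (((List.range n).filter (fun j => decide (0 < j) && decide (l[j]? = some '.'))).reverse).map l.take := by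
  induction n with
  | zero => simp [desc]
  | succ n ih =>
    rw [desc_succ, ih, List.range_succ, List.filter_append, List.reverse_append, List.map_append]
    by_cases h : 0 < n ∧ l[n]? = some '.'
    · rw [if_pos h]
      simp [h.1, h.2]
    · rw [if_neg h]
      rcases Decidable.not_and_iff_not_or_not.mp h with h1 | h2
      · simp [Nat.le_zero.mp (Nat.not_lt.mp h1)]
      · simp [h2]

theorem dotIdx_lt (l : List Char) : ∀ k ∈ dotIdx l, k < l.length := by
  intro k hk
  rw [dotIdx_eq_range] at hk
  exact List.mem_range.mp (List.mem_of_mem_filter hk)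

-- B's post-processing of the cut list equals A's descending desc list
theorem cuts_post_eq_desc (l : List Char) :
    ((((dotIdx l).map (fun k => l.take k)).reverse).filter (fun p => !p.isEmpty)) = desc l l.length := by
  rw [← List.map_reverse, List.filter_map]
  have hcong : ((dotIdx l).reverse).filter ((fun p => !p.isEmpty) ∘ (fun k => l.take k))
      = ((dotIdx l).reverse).filter (fun k => decide (0 < k)) := by
    apply List.filter_congr
    intro k hk
    have hlt : k < l.length := dotIdx_lt l k (List.mem_reverse.mp hk)
    simp only [Function.comp]
    rcases Nat.eq_zero_or_pos k with h0 | hpos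
    · simp [h0]
    · have hne : l.take k ≠ [] := by
        simp only [ne_eq, List.take_eq_nil_iff]
        push_neg
        refine ⟨by omega, ?_⟩
        intro h
        rw [h] at hlt
        simp at hlt
      simp [hne, hpos]
  rw [hcong, desc_eq_range, dotIdx_eq_range, ← List.filter_reverse, ← List.filter_reverse,
    List.filter_filter]

-- B's whole pipeline equals l :: desc
theorem alt_eq_desc (s : String) :
    get_module_import_parts_alt s = s :: (desc s.toList s.toList.length).map String.mk := by
  unfold get_module_import_parts_alt
  simp only [splitOn_eq_mySplit, mySplit_eq s.toList []]
  have hdrop : ((([] : List Char) ++ firstSeg s.toList) :: restSegs s.toList).drop 1 = restSegs s.toList := rfl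
  have hhead : ((([] : List Char) ++ firstSeg s.toList) :: restSegs s.toList).headD [] = firstSeg s.toList := by simp
  rw [hdrop, hhead]
  rw [foldl_bStep (restSegs s.toList) [firstSeg s.toList] (by simp)]
  have hgl : ([firstSeg s.toList] : List (List Char)).getLastD [] = firstSeg s.toList := rfl
  rw [hgl]
  have hc : [firstSeg s.toList] ++ chain (firstSeg s.toList) (restSegs s.toList)
      = cuts [] s.toList := by
    have := chain_eq_cuts s.toList []
    simpa using this
  rw [hc, cuts_eq_dotIdx s.toList []]
  simp only [List.nil_append, List.dropLast_concat]
  rw [cuts_post_eq_desc]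

-- ===== VERDICT (by name: the statement is the Claim_ definition above) =====
theorem get_module_import_parts_spec : Claim_equal_get_module_import_parts := by
  intro s _
  unfold Spec_get_module_import_parts get_module_import_parts
  rw [alt_eq_desc]
  cases hlen : s.toList.length with
  | zero =>
    rw [show ((0 : Nat) : Int) - 1 = (-1 : Int) by omega, aGo, if_neg (by omega)]
    simp [desc]
    exact String.ofList_toList
  | succ m =>
    rw [show ((m + 1 : Nat) : Int) - 1 = ((m : Nat) : Int) by push_cast; ring]
    rw [aGo_eq_desc s.toList m]
    simp
    exact String.ofList_toList
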